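-- pv_equiv track=rewrite | github.com/domi1504/sat-project | sat/instance/instance.py | clauses_valid
-- ===== SOURCE A (Python) =====
-- def clauses_valid(clauses: list[tuple[int, ...]], variables_perfectly_1_to_n: bool = False) -> bool:
--     """
--     Validates a list of SAT clauses.
--
--     Each clause must be a tuple of non-zero integers, where each integer represents a literal.
--     Literals are positive or negative integers corresponding to variables and their negations.
--
--     Validation includes:
--     - Ensuring all clauses are tuples
--     - Ensuring all literals are integers
--     - Ensuring no literal is 0
--
--     If `variables_perfectly_1_to_n` is True, an additional check is performed:
--     - All variable indices must form the exact range [1, 2, ..., n] without gaps or duplicates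
--
--     :param clauses: List of clauses, where each clause is a tuple of integer literals.
--     :param variables_perfectly_1_to_n: Whether to enforce that variables form the exact sequence [1, ..., n].
--     :return: True if all validation checks pass; False otherwise.
--     """
--
--     # Check datatypes
--     for clause in clauses:
--         if type(clause) != tuple:
--             return False
--         for lit in clause:
--             if type(lit) != int:
--                 return False
--
--     # Variables are 1-based
--     for clause in clauses:
--         for lit in clause:
--             if lit == 0:
--                 return False
--
--     if not variables_perfectly_1_to_n:
--         # Do not check following property
--         return True
--
--     # Check that only variables from exactly  [1, ..., n] (not more, not less!)
--     variables = set()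
--     for clause in clauses:
--         for lit in clause:
--             variables.add(abs(lit))
--
--     variables = sorted(list(variables))
--     if variables != list(range(1, len(variables) + 1)):
--         return False
--
--     # All checks succeeded
--     return True
-- ===== SOURCE B (Python) =====
-- def clauses_valid(clauses: list[tuple[int, ...]], variables_perfectly_1_to_n: bool = False) -> bool:
--     # Single pass: validate types and non-zero literals, collecting |lit| on the fly.
--     variables = set()
--     for clause in clauses:
--         if type(clause) != tuple:
--             return False
--         for lit in clause:
--             if type(lit) != int:
--                 return False
--             if lit == 0:
--                 return False
--             if variables_perfectly_1_to_n:
--                 variables.add(abs(lit))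
--     if not variables_perfectly_1_to_n:
--         return True
--     if not variables:
--         return True
--     # distinct positives whose maximum equals their count are exactly 1..n
--     return max(variables) == len(variables)
-- ===== Notes on version B (the rewrite author's own statement) =====
-- stated objective: simpler
-- what changed: B folds A's three separate clause sweeps (type/zero check, set-building, sorted-list-vs-range comparison) into one pass that collects |lit| while validating, and replaces the sort-and-compare with a max(variables)==len(variables) check on the distinct positive variables.
import Mathlib
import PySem

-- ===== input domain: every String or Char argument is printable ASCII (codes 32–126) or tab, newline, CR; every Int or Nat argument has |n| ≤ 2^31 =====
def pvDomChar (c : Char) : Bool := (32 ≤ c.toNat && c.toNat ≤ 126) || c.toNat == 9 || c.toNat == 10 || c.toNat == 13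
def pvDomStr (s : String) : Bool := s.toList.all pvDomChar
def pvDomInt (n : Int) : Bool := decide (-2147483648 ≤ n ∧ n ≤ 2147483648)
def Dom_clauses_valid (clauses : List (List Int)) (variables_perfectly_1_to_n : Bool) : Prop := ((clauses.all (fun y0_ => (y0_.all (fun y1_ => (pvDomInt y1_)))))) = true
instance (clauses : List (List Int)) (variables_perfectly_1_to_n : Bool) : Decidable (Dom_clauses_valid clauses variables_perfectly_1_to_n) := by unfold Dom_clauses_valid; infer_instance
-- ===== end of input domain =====

-- B folds A's three sweeps into one validating pass and replaces the sorted-vs-range comparison by a max==count check (simpler).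

-- ===== PORT A =====
-- Python's first loop checks type(clause) == tuple and type(lit) == int; under the
-- List (List Int) typing those checks always pass, so only the zero check remains.
def clauses_valid (clauses : List (List Int)) (variables_perfectly_1_to_n : Bool) : Bool :=
  if clauses.any (fun clause => clause.any (fun lit => lit == 0)) then false
  else if !variables_perfectly_1_to_n then true
  else
    let vs : PySem.Set Int :=
      clauses.foldl (fun s clause => clause.foldl (fun s lit => PySem.Set.add s |lit|) s) PySem.Set.empty
    let vars := PySem.List.sorted vs (fun x => x) false
    if vars ≠ PySem.List.pyRange 1 ((vars.length : Int) + 1) 1 then false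
    else true

-- ===== PORT B =====
-- B's inner loop over one clause: early-returns (none) on a zero literal, else threads the set.
def pvScanLits (flag : Bool) : List Int → PySem.Set Int → Option (PySem.Set Int)
  | [], s => some s
  | l :: ls, s =>
      if l = 0 then none
      else pvScanLits flag ls (if flag then PySem.Set.add s |l| else s)

-- B's outer loop over the clauses.
def pvScan (flag : Bool) : List (List Int) → PySem.Set Int → Option (PySem.Set Int)
  | [], s => some s
  | c :: cs, s =>
      match pvScanLits flag c s with
      | none => none
      | some s' => pvScan flag cs s'

def clauses_valid_alt (clauses : List (List Int)) (variables_perfectly_1_to_n : Bool) : Bool :=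
  match pvScan variables_perfectly_1_to_n clauses PySem.Set.empty with
  | none => false
  | some vs =>
      if !variables_perfectly_1_to_n then true
      else
        match PySem.List.max? vs (fun x => x) with
        | none => true
        | some m => m == (vs.length : Int)

-- ===== PRECONDITION & SPEC =====
def Spec_clauses_valid (clauses : List (List Int)) (variables_perfectly_1_to_n : Bool) (out : Bool) : Prop := out = clauses_valid_alt clauses variables_perfectly_1_to_n
instance (clauses : List (List Int)) (variables_perfectly_1_to_n : Bool) (out : Bool) : Decidable (Spec_clauses_valid clauses variables_perfectly_1_to_n out) := by unfold Spec_clauses_valid; infer_instance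

-- ===== CLAIM (what is proved, stated in full; the proofs are below) =====
def Claim_equal_clauses_valid : Prop := ∀ (clauses : List (List Int)) (variables_perfectly_1_to_n : Bool), Dom_clauses_valid clauses variables_perfectly_1_to_n → Spec_clauses_valid clauses variables_perfectly_1_to_n (clauses_valid clauses variables_perfectly_1_to_n)

-- ===== LEMMAS AND PROOFS =====

lemma pvScanLits_eq_none_iff (flag : Bool) (c : List Int) (s : PySem.Set Int) :
    pvScanLits flag c s = none ↔ (0 : Int) ∈ c := by
  induction c generalizing s with
  | nil => simp [pvScanLits]
  | cons l ls ih =>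
      by_cases h : l = 0
      · subst h; simp [pvScanLits]
      · rw [pvScanLits, if_neg h, ih]
        simp [List.mem_cons, eq_comm, h]

lemma pvScanLits_of_no_zero (flag : Bool) (c : List Int) (s : PySem.Set Int)
    (h : (0 : Int) ∉ c) :
    pvScanLits flag c s =
      some (if flag then c.foldl (fun s l => PySem.Set.add s |l|) s else s) := by
  induction c generalizing s with
  | nil => cases flag <;> simp [pvScanLits]
  | cons l ls ih =>
      simp only [List.mem_cons, not_or] at h
      have hl : ¬ l = 0 := fun e => h.1 e.symm
      rw [pvScanLits, if_neg hl, ih _ h.2]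
      cases flag <;> simp

lemma pvScan_eq_none_iff (flag : Bool) (cs : List (List Int)) (s : PySem.Set Int) :
    pvScan flag cs s = none ↔ ∃ c ∈ cs, (0 : Int) ∈ c := by
  induction cs generalizing s with
  | nil => simp [pvScan]
  | cons c cs ih =>
      by_cases h : (0 : Int) ∈ c
      · simp [pvScan, (pvScanLits_eq_none_iff flag c s).2 h, h]
      · rw [pvScan, pvScanLits_of_no_zero flag c s h]
        simp [ih, h]

lemma pvScan_of_no_zero (flag : Bool) (cs : List (List Int)) (s : PySem.Set Int)
    (h : ∀ c ∈ cs, (0 : Int) ∉ c) :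
    pvScan flag cs s =
      some (if flag then
              cs.foldl (fun s clause => clause.foldl (fun s lit => PySem.Set.add s |lit|) s) s
            else s) := by
  induction cs generalizing s with
  | nil => cases flag <;> simp [pvScan]
  | cons c cs ih =>
      rw [pvScan, pvScanLits_of_no_zero flag c s (h c (by simp))]
      cases flag <;> simp [ih _ (fun c' hc' => h c' (by simp [hc']))]

-- A's nested fold builds set(|lit| for clause in clauses for lit in clause).
lemma pvFold_eq_ofList (cs : List (List Int)) :
    cs.foldl (fun s clause => clause.foldl (fun s lit => PySem.Set.add s |lit|) s)
      (PySem.Set.empty : PySem.Set Int)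
    = PySem.Set.ofList (cs.flatMap (fun c => c.map (fun l => |l|))) := by
  have key : ∀ (cs : List (List Int)) (s : PySem.Set Int),
      cs.foldl (fun s clause => clause.foldl (fun s lit => PySem.Set.add s |lit|) s) s
        = PySem.Set.update s (cs.flatMap (fun c => c.map (fun l => |l|))) := by
    intro cs
    induction cs with
    | nil => intro s; rfl
    | cons c cs ih =>
        intro s
        rw [List.foldl_cons, ih, List.flatMap_cons, PySem.Set.update_append]
        congr 1
        show _ = (c.map (fun l => |l|)).foldl PySem.Set.add s
        rw [List.foldl_map]
  rw [key, PySem.Set.ofList_eq_foldl]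
  rfl

-- The sorted-vs-range test on a Nodup list of positive ints equals the max==len test.
lemma pvSorted_iff_max (s : List Int) (hnd : s.Nodup) (hpos : ∀ x ∈ s, 1 ≤ x) :
    (PySem.List.sorted s (fun x => x) false = PySem.List.pyRange 1 ((s.length : Int) + 1) 1)
    ↔ (match PySem.List.max? s (fun x => x) with
       | none => True
       | some m => m = (s.length : Int)) := by
  cases s with
  | nil =>
      simp [PySem.List.sorted, PySem.List.max?, PySem.List.pyRange_one_eq_nil (le_refl (1 : Int))]
  | cons a t =>
      set s := a :: t with hs
      have hne : s ≠ [] := by simp [hs]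
      obtain ⟨m, hmax⟩ : ∃ m, PySem.List.max? s (fun x => x) = some m := by
        cases h : PySem.List.max? s (fun x => x) with
        | none => exact absurd ((PySem.List.max?_eq_none_iff s (fun x => x)).mp h) hne
        | some m => exact ⟨m, rfl⟩
      have hm_mem : m ∈ s := PySem.List.max?_mem hmax
      have hm_max : ∀ y ∈ s, y ≤ m := PySem.List.max?_isMax hmax
      have hlen1 : 1 ≤ s.length := by simp [hs]
      have hrlen : (PySem.List.pyRange 1 ((s.length : Int) + 1) 1).length = s.length := by
        rw [PySem.List.length_pyRange_one]; omega
      rw [hmax]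
      constructor
      · intro h
        have hperm : s.Perm (PySem.List.pyRange 1 ((s.length : Int) + 1) 1) := by
          have := PySem.List.sorted_perm s (fun x => x) false
          rw [h] at this
          exact this.symm
        have hmr : m ∈ PySem.List.pyRange 1 ((s.length : Int) + 1) 1 := hperm.mem_iff.mp hm_mem
        rw [PySem.List.mem_pyRange_one] at hmr
        have hnr : (s.length : Int) ∈ PySem.List.pyRange 1 ((s.length : Int) + 1) 1 := by
          rw [PySem.List.mem_pyRange_one]; omega
        have hns : (s.length : Int) ∈ s := hperm.mem_iff.mpr hnr
        have := hm_max _ hns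
        omega
      · intro h
        have hsub : s ⊆ PySem.List.pyRange 1 ((s.length : Int) + 1) 1 := by
          intro x hx
          rw [PySem.List.mem_pyRange_one]
          have := hpos x hx
          have := hm_max x hx
          omega
        have hperm : (PySem.List.pyRange 1 ((s.length : Int) + 1) 1).Perm s :=
          ((hnd.subperm hsub).perm_of_length_le (le_of_eq hrlen)).symm
        exact PySem.List.sorted_id_eq_of_perm_of_pairwise s _
          hperm ((PySem.List.pairwise_lt_pyRange_one 1 _).imp le_of_lt)

theorem pv_main (clauses : List (List Int)) (flag : Bool) :
    clauses_valid clauses flag = clauses_valid_alt clauses flag := by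
  by_cases hz : ∃ c ∈ clauses, (0 : Int) ∈ c
  · have hany : clauses.any (fun clause => clause.any (fun lit => lit == 0)) = true := by
      rw [List.any_eq_true]
      obtain ⟨c, hc, h0⟩ := hz
      exact ⟨c, hc, by rw [List.any_eq_true]; exact ⟨0, h0, by simp⟩⟩
    rw [clauses_valid, clauses_valid_alt, if_pos hany, (pvScan_eq_none_iff flag clauses _).mpr hz]
  · simp only [not_exists, not_and] at hz
    have hno : ∀ c ∈ clauses, (0 : Int) ∉ c := hz
    have hany : clauses.any (fun clause => clause.any (fun lit => lit == 0)) = false := by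
      simp only [List.any_eq_false]
      intro c hc
      simp only [List.any_eq_true, not_exists, not_and]
      intro l hl
      simp only [beq_iff_eq]
      exact fun e => hno c hc (e ▸ hl)
    rw [clauses_valid, clauses_valid_alt, hany, pvScan_of_no_zero flag clauses _ hno]
    cases flag with
    | false => simp
    | true =>
        simp only [Bool.not_true, Bool.false_eq_true, if_false, if_true]
        rw [pvFold_eq_ofList]
        set L := clauses.flatMap (fun c => c.map (fun l => |l|)) with hL
        set s : PySem.Set Int := PySem.Set.ofList L with hsdef
        have hnd : s.Nodup := PySem.Set.nodup_ofList L
        have hpos : ∀ x ∈ s, 1 ≤ x := by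
          intro x hx
          rw [hsdef, PySem.Set.mem_ofList, hL, List.mem_flatMap] at hx
          obtain ⟨c, hc, hx⟩ := hx
          obtain ⟨l, hl, rfl⟩ := List.mem_map.mp hx
          have : l ≠ 0 := fun e => hno c hc (e ▸ hl)
          have := abs_pos.mpr this
          omega
        have key := pvSorted_iff_max s hnd hpos
        cases hmax : PySem.List.max? s (fun x => x) with
        | none =>
            rw [hmax] at key
            simp [key.mpr trivial]
        | some m =>
            rw [hmax] at key
            by_cases hm : m = (s.length : Int)
            · simp [key.mpr hm, hm]
            · have hne2 : ¬ (PySem.List.sorted s (fun x => x) false =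
                  PySem.List.pyRange 1 ((s.length : Int) + 1) 1) :=
                fun h => hm (key.mp h)
              simp [PySem.List.length_sorted, hne2, hm]

-- ===== VERDICT (by name: the statement is the Claim_ definition above) =====
theorem clauses_valid_spec : Claim_equal_clauses_valid := by
  intro clauses flag _
  unfold Spec_clauses_valid
  exact pv_main clauses flag
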